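-- pv_equiv track=rewrite | github.com/riosew/aiNet-Alzheimer-Disease | aiNet_10Nov2023.py | eliminar_columnas_con_guiones
-- ===== SOURCE A (Python) =====
-- def eliminar_columnas_con_guiones(matriz):
--     """
--     Elimina las columnas de la matriz que contienen únicamente guiones.
--
--     :param matriz: Lista de cadenas de texto que representa la matriz.
--     :return: Nueva matriz con las columnas de solo guiones eliminadas.
--     """
-- #    imprimir_matriz(matriz)
--     columnas_validas = []
--     for j in range(len(matriz[0])):
--         columna_contiene_caracter = any(fila[j] != '-' for fila in matriz)
--         if columna_contiene_caracter:
--             columnas_validas.append(j)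
--
--     matriz_sin_guiones = []
--     for fila in matriz:
--         nueva_fila = ''.join(fila[j] for j in columnas_validas)
--         matriz_sin_guiones.append(nueva_fila)
--
--     return matriz_sin_guiones
-- ===== SOURCE B (Python) =====
-- def eliminar_columnas_con_guiones(matriz):
--     cols = [[fila[j] for fila in matriz] for j in range(len(matriz[0]))]
--     kept = [c for c in cols if any(ch != '-' for ch in c)]
--     return [''.join(c[i] for c in kept) for i in range(len(matriz))]
-- ===== Notes on version B (the rewrite author's own statement) =====
-- stated objective: idiomatic
-- what changed: B materializes the transposed matrix as explicit column lists, filters out all-dash columns as objects, and rebuilds each row from the surviving columns, instead of A's valid-index bookkeeping with per-row index lookups.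
import Mathlib
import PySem

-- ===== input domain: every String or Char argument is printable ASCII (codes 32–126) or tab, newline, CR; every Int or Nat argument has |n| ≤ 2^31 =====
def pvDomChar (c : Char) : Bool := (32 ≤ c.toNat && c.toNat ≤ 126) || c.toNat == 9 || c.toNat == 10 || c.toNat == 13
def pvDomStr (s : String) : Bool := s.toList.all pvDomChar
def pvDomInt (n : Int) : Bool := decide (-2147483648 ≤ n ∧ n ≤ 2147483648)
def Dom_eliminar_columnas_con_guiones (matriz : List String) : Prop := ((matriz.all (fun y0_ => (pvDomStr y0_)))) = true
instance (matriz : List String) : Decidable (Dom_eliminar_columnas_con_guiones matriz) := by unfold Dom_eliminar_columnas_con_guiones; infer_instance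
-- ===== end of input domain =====

-- B rebuilds the matrix from explicit transposed column lists (filtered as objects) instead of A's valid-index bookkeeping; objective: idiomatic.


-- ===== PORT A =====
-- for j in range(len(matriz[0])): if any(fila[j] != '-' for fila in matriz): columnas_validas.append(j)
-- fila[j] is in range under Pre_, so getD's default never fires there.
def eliminar_columnas_con_guiones (matriz : List String) : List String :=
  let columnas_validas : List Nat :=
    (List.range (matriz.headD "").toList.length).foldl
      (fun acc j =>
        if matriz.any (fun fila => fila.toList.getD j '-' ≠ '-') then acc ++ [j] else acc) []
  matriz.foldl
    (fun out fila => out ++ [String.ofList (columnas_validas.map (fun j => fila.toList.getD j '-'))]) []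

-- ===== PORT B =====
-- cols = [[fila[j] for fila in matriz] for j in range(len(matriz[0]))]
-- kept = [c for c in cols if any(ch != '-' for ch in c)]
-- return [''.join(c[i] for c in kept) for i in range(len(matriz))]
def eliminar_columnas_con_guiones_alt (matriz : List String) : List String :=
  let cols : List (List Char) :=
    (List.range (matriz.headD "").toList.length).map
      (fun j => matriz.map (fun fila => fila.toList.getD j '-'))
  let kept := cols.filter (fun c => c.any (fun ch => ch ≠ '-'))
  (List.range matriz.length).map (fun i => String.ofList (kept.map (fun c => c.getD i '-')))

-- ===== PRECONDITION & SPEC =====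
-- Pre_ excludes exactly the inputs where A raises IndexError: the empty matrix
-- (matriz[0]) and matrices where some row is shorter than the first row.
def Pre_eliminar_columnas_con_guiones (matriz : List String) : Prop :=
  matriz ≠ [] ∧ ∀ fila ∈ matriz, (matriz.headD "").toList.length ≤ fila.toList.length
instance (matriz : List String) : Decidable (Pre_eliminar_columnas_con_guiones matriz) := by
  unfold Pre_eliminar_columnas_con_guiones; infer_instance
def pvWitness_eliminar_columnas_con_guiones : List String := ["a-", "-b"]
def Spec_eliminar_columnas_con_guiones (matriz : List String) (out : List String) : Prop :=
  out = eliminar_columnas_con_guiones_alt matriz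
instance (matriz : List String) (out : List String) : Decidable (Spec_eliminar_columnas_con_guiones matriz out) := by
  unfold Spec_eliminar_columnas_con_guiones; infer_instance

-- ===== CLAIM (what is proved, stated in full; the proofs are below) =====
def Claim_equal_eliminar_columnas_con_guiones : Prop := ∀ (matriz : List String), Dom_eliminar_columnas_con_guiones matriz → Pre_eliminar_columnas_con_guiones matriz → Spec_eliminar_columnas_con_guiones matriz (eliminar_columnas_con_guiones matriz)

-- ===== LEMMAS AND PROOFS =====

-- the two ports agree on EVERY input (Pre_ is only about where the Pythons raise)
theorem ports_eq (matriz : List String) :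
    eliminar_columnas_con_guiones matriz = eliminar_columnas_con_guiones_alt matriz := by
  unfold eliminar_columnas_con_guiones eliminar_columnas_con_guiones_alt
  simp only [PySem.List.foldl_append_if_eq_filter, PySem.List.foldl_append_singleton_eq_map,
    List.nil_append, List.filter_map]
  apply List.ext_getElem
  · simp
  · intro i h1 h2
    have hi : i < matriz.length := by simpa using h1
    simp only [List.getElem_map, List.getElem_range, List.map_map, Function.comp_def, List.any_map]
    congr 1
    apply List.map_congr_left
    intro j hj
    simp [List.getD_eq_getElem?_getD, hi]

-- ===== VERDICT (by name: the statement is the Claim_ definition above) =====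
theorem eliminar_columnas_con_guiones_spec : Claim_equal_eliminar_columnas_con_guiones := by
  intro matriz _ _
  unfold Spec_eliminar_columnas_con_guiones
  exact ports_eq matriz
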